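-- pv_equiv track=rewrite | github.com/yandex-tabkit/tabkit | tabkit/header.py | split_header
-- ===== SOURCE A (Python) =====
-- def split_header(header):
--     """
--     >>> header = "# shows:int clicks:int ctr:float rel url #ORDER: url:asc, ctr:desc:num #SIZE: 12312 #META: # #ANYTHING"
--     >>> list(split_header(header))
--     [' shows:int clicks:int ctr:float rel url ', 'ORDER: url:asc, ctr:desc:num ', 'SIZE: 12312 ', 'META: # #ANYTHING']
--     """
--     if not header.startswith('#'):
--         raise Exception('Bad header %r' % (header,))
--
--     start = 1
--     while True:
--         pos = header.find('#', start)
--         if pos < 0: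
--             yield header[start:]
--             break
--         substr = header[start:pos]
--         if substr.startswith('META'):
--             yield header[start:]
--             break
--         yield substr
--         start = pos + 1
-- ===== SOURCE B (Python) =====
-- def split_header(header):
--     if not header.startswith('#'):
--         raise Exception('Bad header %r' % (header,))
--     parts = header[1:].split('#')
--     for i, part in enumerate(parts):
--         if part.startswith('META'):
--             yield '#'.join(parts[i:])
--             return
--         yield part
-- ===== Notes on version B (the rewrite author's own statement) =====
-- stated objective: alternative
-- what changed: Replaces the incremental find/slice pointer loop with an eager split of header[1:] on '#' into a list, yielding segments until one starts with 'META', whose tail is reconstructed with '#'.join.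
import Mathlib
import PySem

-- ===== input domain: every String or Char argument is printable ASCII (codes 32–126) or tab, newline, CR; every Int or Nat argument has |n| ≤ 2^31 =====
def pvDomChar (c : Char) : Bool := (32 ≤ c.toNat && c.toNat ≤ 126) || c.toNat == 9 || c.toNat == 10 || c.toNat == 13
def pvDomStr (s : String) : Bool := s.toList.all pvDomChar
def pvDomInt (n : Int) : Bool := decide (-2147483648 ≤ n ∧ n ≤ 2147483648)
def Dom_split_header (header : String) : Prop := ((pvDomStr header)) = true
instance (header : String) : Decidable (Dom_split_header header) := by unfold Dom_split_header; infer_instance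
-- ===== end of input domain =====

-- B replaces A's incremental find/slice pointer loop by one eager split on '#' plus a
-- '#'.join reconstruction of the tail once a 'META' segment is met (alternative structure, same cost).

-- ===== PORT A =====
-- A's while loop, with the moving index 'start' represented by the loop state
-- rest = header[start:] (so header.find('#', start) becomes rest.find('#'),
-- header[start:pos] becomes rest.take, header[pos+1:] becomes rest.drop — exact).
def splitHeaderGo (rest : List Char) : List (List Char) :=
  let pos := PySem.Chars.find rest ['#']
  if h : pos < 0 then
    [rest]
  else
    let substr := rest.take pos.toNat
    if PySem.Chars.startswith substr ['M','E','T','A'] then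
      [rest]
    else
      substr :: splitHeaderGo (rest.drop (pos.toNat + 1))
termination_by rest.length
decreasing_by
  have h0 : (0 : Int) ≤ PySem.Chars.find rest ['#'] := by omega
  have hpre := (PySem.Chars.find_spec h0).1
  have hne : (rest.drop (PySem.Chars.find rest ['#']).toNat) ≠ [] := by
    intro hnil; rw [hnil] at hpre; exact absurd (List.prefix_nil.mp hpre) (by simp)
  have : (PySem.Chars.find rest ['#']).toNat < rest.length := by
    by_contra hge
    exact hne (List.drop_eq_nil_of_le (by omega))
  simp only [List.length_drop]
  omega

def split_header (header : String) : List String :=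
  if !(PySem.Str.startswith header "#") then
    []   -- Python A raises Exception('Bad header …') here; excluded by Pre_split_header
  else
    (splitHeaderGo (header.toList.drop 1)).map String.mk   -- header[1:] with start = 1

-- ===== PORT B =====
-- Source B's for-loop over parts with early return at a META segment.
def splitHeaderAltGo : List (List Char) → List (List Char)
  | [] => []
  | p :: ps =>
    if PySem.Chars.startswith p ['M','E','T','A'] then
      [PySem.Chars.join ['#'] (p :: ps)]   -- '#'.join(parts[i:])
    else
      p :: splitHeaderAltGo ps

def split_header_alt (header : String) : List String :=
  if !(PySem.Str.startswith header "#") then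
    []   -- Python B raises Exception('Bad header …') here; excluded by Pre_split_header
  else
    (splitHeaderAltGo (PySem.Chars.splitOn (header.toList.drop 1) ['#'])).map String.mk

-- ===== PRECONDITION & SPEC =====
-- A (and B) raise Exception on headers not starting with '#'; exactly those are excluded.
def Pre_split_header (header : String) : Prop := PySem.Str.startswith header "#" = true
instance (header : String) : Decidable (Pre_split_header header) := by unfold Pre_split_header; infer_instance

def pvWitness_split_header : String := "# a:int b #ORDER: a #META: x #y"

def Spec_split_header (header : String) (out : List String) : Prop := out = split_header_alt header
instance (header : String) (out : List String) : Decidable (Spec_split_header header out) := by unfold Spec_split_header; infer_instance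

-- ===== CLAIM (what is proved, stated in full; the proofs are below) =====
def Claim_equal_split_header : Prop := ∀ (header : String), Dom_split_header header → Pre_split_header header → Spec_split_header header (split_header header)

-- ===== LEMMAS AND PROOFS =====

-- proof-side simple recursion: Python's str.split('#') as a one-char structural recursion
def sp : List Char → List (List Char)
  | [] => [[]]
  | c :: rest =>
    if c = '#' then [] :: sp rest
    else
      match sp rest with
      | [] => [[c]]   -- unreachable
      | p :: ps => (c :: p) :: ps

theorem sp_ne_nil (l : List Char) : sp l ≠ [] := by
  cases l with
  | nil => simp [sp]
  | cons c rest =>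
    simp only [sp]
    split_ifs with h
    · simp
    · cases hr : sp rest <;> simp

theorem join_sp (l : List Char) : PySem.Chars.join ['#'] (sp l) = l := by
  induction l with
  | nil => simp [sp, PySem.Chars.join, List.intercalate]
  | cons c rest ih =>
    simp only [sp]
    split_ifs with h
    · obtain ⟨p, ps, hps⟩ : ∃ p ps, sp rest = p :: ps := by
        cases hr : sp rest with
        | nil => exact absurd hr (sp_ne_nil rest)
        | cons p ps => exact ⟨p, ps, rfl⟩
      rw [hps] at ih ⊢
      rw [PySem.Chars.join_cons_cons]
      simp [ih, h]
    · cases hr : sp rest with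
      | nil => exact absurd hr (sp_ne_nil rest)
      | cons p ps =>
        rw [hr] at ih
        cases ps with
        | nil => simp [PySem.Chars.join_singleton] at ih ⊢; simp [ih]
        | cons q qs =>
          rw [PySem.Chars.join_cons_cons] at ih ⊢
          simp [← ih]

theorem sp_of_not_mem {l : List Char} (h : '#' ∉ l) : sp l = [l] := by
  induction l with
  | nil => simp [sp]
  | cons c rest ih =>
    simp only [List.mem_cons, not_or] at h
    have hc : ¬ c = '#' := fun hh => h.1 hh.symm
    simp [sp, hc, ih h.2]

theorem sp_split (a b : List Char) (ha : '#' ∉ a) :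
    sp (a ++ '#' :: b) = a :: sp b := by
  induction a with
  | nil => simp [sp]
  | cons c a ih =>
    simp only [List.mem_cons, not_or] at ha
    simp only [List.cons_append, sp, ih ha.2]
    rw [if_neg (fun hh => ha.1 hh.symm)]

-- PySem.Chars.splitOn.go related to sp
theorem splitOnGo_eq (fuel : Nat) : ∀ (l cur : List Char) (acc : List (List Char)),
    l.length < fuel →
    PySem.Chars.splitOn.go ['#'] fuel l cur acc
      = acc.reverse ++ (sp l).modifyHead (cur.reverse ++ ·) := by
  induction fuel with
  | zero => intro l cur acc h; omega
  | succ fuel ih =>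
    intro l cur acc h
    cases l with
    | nil => simp [PySem.Chars.splitOn.go, sp]
    | cons c rest =>
      simp only [PySem.Chars.splitOn.go]
      by_cases hc : c = '#'
      · rw [if_pos (by simp [hc, List.isPrefixOf])]
        have hdrop : List.drop ['#'].length (c :: rest) = rest := by simp
        rw [hdrop, ih rest [] _ (by simpa using Nat.lt_of_succ_lt_succ h)]
        obtain ⟨p, ps, hps⟩ : ∃ p ps, sp rest = p :: ps := by
          cases hr : sp rest with
          | nil => exact absurd hr (sp_ne_nil rest)
          | cons p ps => exact ⟨p, ps, rfl⟩
        simp [sp, hc, hps]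
      · rw [if_neg (by simp [List.isPrefixOf]; exact fun hh => hc hh.symm)]
        rw [ih rest (c :: cur) acc (by simpa using Nat.lt_of_succ_lt_succ h)]
        obtain ⟨p, ps, hps⟩ : ∃ p ps, sp rest = p :: ps := by
          cases hr : sp rest with
          | nil => exact absurd hr (sp_ne_nil rest)
          | cons p ps => exact ⟨p, ps, rfl⟩
        simp [sp, hc, hps]

theorem splitOn_eq_sp (l : List Char) : PySem.Chars.splitOn l ['#'] = sp l := by
  rw [PySem.Chars.splitOn, splitOnGo_eq (l.length + 1) l [] [] (by omega)]
  cases h : sp l with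
  | nil => exact absurd h (sp_ne_nil l)
  | cons p ps => simp

-- the first '#' found by Chars.find splits l as take/drop around it
theorem find_decomp (l : List Char) (h : ¬ PySem.Chars.find l ['#'] < 0) :
    let p := (PySem.Chars.find l ['#']).toNat
    l = l.take p ++ '#' :: l.drop (p + 1) ∧ '#' ∉ l.take p := by
  intro p
  have h0 : (0 : Int) ≤ PySem.Chars.find l ['#'] := by omega
  obtain ⟨hpre, hmin⟩ := PySem.Chars.find_spec h0
  obtain ⟨t, ht⟩ := hpre
  simp only [List.singleton_append] at ht
  have hplt : p < l.length := by
    have h1 : 0 < (l.drop p).length := by rw [← ht]; simp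
    have h2 := List.length_drop (i := p) (l := l)
    omega
  have hdrop : l.drop p = '#' :: l.drop (p + 1) := by
    rw [← ht]
    have ht2 : l.drop (p + 1) = t := by
      have h3 : (l.drop p).drop 1 = l.drop (p + 1) := List.drop_drop
      rw [← h3, ← ht]; rfl
    rw [ht2]
  constructor
  · conv_lhs => rw [← List.take_append_drop p l]
    rw [hdrop]
  · intro hmem
    obtain ⟨i, hi, hgi⟩ := List.getElem_of_mem hmem
    have hlt : i < p ∧ i < l.length := by
      have h4 := List.length_take (i := p) (l := l)
      omega
    apply hmin i hlt.1
    refine ⟨l.drop (i + 1), ?_⟩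
    have h5 : l[i] = '#' := by rw [← hgi]; exact (List.getElem_take).symm
    simp only [List.singleton_append]
    rw [← List.getElem_cons_drop hlt.2, h5]

-- find < 0 ↔ no '#'
theorem find_neg_iff (l : List Char) : PySem.Chars.find l ['#'] < 0 ↔ '#' ∉ l := by
  have hge := PySem.Chars.neg_one_le_find l ['#']
  constructor
  · intro h hm
    have : PySem.Chars.find l ['#'] = -1 := by omega
    have := PySem.Chars.find_eq_neg_one_iff l ['#'] |>.mp this
    exact this ((List.singleton_infix_iff _ _).mpr hm)
  · intro hm
    by_contra h
    have h0 : (0 : Int) ≤ PySem.Chars.find l ['#'] := by omega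
    obtain ⟨hpre, -⟩ := PySem.Chars.find_spec h0
    exact hm (List.mem_of_mem_drop (hpre.mem (by simp)))

-- main loop equivalence
theorem key (l : List Char) : splitHeaderGo l = splitHeaderAltGo (sp l) := by
  fun_induction splitHeaderGo l with
  | case1 rest pos h =>
    -- no '#': sp rest = [rest]
    have hnm : '#' ∉ rest := (find_neg_iff rest).mp h
    rw [sp_of_not_mem hnm]
    simp only [splitHeaderAltGo]
    split_ifs with hm
    · rw [PySem.Chars.join_singleton]
    · rfl
  | case2 rest pos h substr hm =>
    -- META segment: both return [rest]
    obtain ⟨hdec, hnm⟩ := find_decomp rest h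
    conv_rhs => rw [hdec]
    rw [sp_split _ _ hnm]
    rw [splitHeaderAltGo, if_pos hm, ← sp_split _ _ hnm, ← hdec, join_sp]
  | case3 rest pos h substr hm ih =>
    obtain ⟨hdec, hnm⟩ := find_decomp rest h
    conv_rhs => rw [hdec]
    rw [sp_split _ _ hnm]
    rw [splitHeaderAltGo, if_neg hm, ih]

theorem main_str (header : String) (h : PySem.Str.startswith header "#" = true) :
    split_header header = split_header_alt header := by
  rw [split_header, split_header_alt, h]
  simp only [Bool.not_true, Bool.false_eq_true, if_false]
  rw [splitOn_eq_sp, key]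

-- ===== VERDICT (by name: the statement is the Claim_ definition above) =====
theorem split_header_spec : Claim_equal_split_header := by
  intro header _ hpre
  unfold Spec_split_header
  exact main_str header hpre
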